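-- pv_equiv track=rewrite | github.com/chvjak/hr-practice | synchronous-shopping.py | get_direction_to_fishtype
-- ===== SOURCE A (Python) =====
-- MAX_SIZE = 10 ** 20
--
-- def get_direction_to_fishtype(fw_distances, fish_types_by_mall):
--     N = len(fw_distances)
--     K = len(fish_types_by_mall)
--
--     tr = [MAX_SIZE] * K
--     fw_ft = [tr[:] for i in range(N)]
--     for i in range(N):
--         for k in range(K):
--             min_fw = MAX_SIZE
--             min_j = None
--             for j in range(N):
--                 if k in fish_types_by_mall[j]:
--                     if fw_distances[i][j] < min_fw:
--                         min_fw = fw_distances[i][j]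
--                         min_j = j
--
--             fw_ft[i][k] = min_j
--
--     return fw_ft
-- ===== SOURCE B (Python) =====
-- MAX_SIZE = 10 ** 20
--
-- def _row_pass(row, fish_types_by_mall, N):
--     # One pass over the malls: for every fish type sold at mall j, update that
--     # type's current (best distance, best mall) entry in a table indexed by type.
--     K = len(fish_types_by_mall)
--     best = [(MAX_SIZE, None)] * K
--     for j, types in zip(range(N), fish_types_by_mall):
--         for t in types:
--             if 0 <= t < K:
--                 d = row[j]
--                 if d < best[t][0]:
--                     best[t] = (d, j)
--     return best
--
-- def get_direction_to_fishtype(fw_distances, fish_types_by_mall):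
--     N = len(fw_distances)
--     return [[b for _, b in _row_pass(row, fish_types_by_mall, N)] for row in fw_distances]
-- ===== Notes on version B (the rewrite author's own statement) =====
-- stated objective: faster
-- what changed: B inverts the loop nest: instead of scanning all N malls with a membership test for every (mall, type) cell, it makes a single pass over the malls per source row, pushing each mall's own fish types into a per-type best-(distance, mall) table.
import Mathlib
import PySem

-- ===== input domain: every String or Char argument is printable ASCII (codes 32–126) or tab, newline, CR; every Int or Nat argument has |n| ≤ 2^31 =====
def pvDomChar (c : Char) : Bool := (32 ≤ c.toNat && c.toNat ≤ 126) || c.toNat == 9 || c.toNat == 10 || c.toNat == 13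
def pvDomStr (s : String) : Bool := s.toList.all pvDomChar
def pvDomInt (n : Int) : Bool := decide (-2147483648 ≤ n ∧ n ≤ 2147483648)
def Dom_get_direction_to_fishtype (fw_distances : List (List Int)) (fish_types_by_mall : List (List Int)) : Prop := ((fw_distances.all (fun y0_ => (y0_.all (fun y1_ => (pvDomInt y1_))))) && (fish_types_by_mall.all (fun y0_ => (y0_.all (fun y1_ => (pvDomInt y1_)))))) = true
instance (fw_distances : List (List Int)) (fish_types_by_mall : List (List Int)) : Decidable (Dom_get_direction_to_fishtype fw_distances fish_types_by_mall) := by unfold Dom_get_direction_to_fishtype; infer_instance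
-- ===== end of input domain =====

-- B inverts the loop nest: one pass over the malls per source row, pushing each mall's own
-- fish types into a per-type best-(distance, mall) table (objective: faster).

-- MAX_SIZE = 10 ** 20
def pvMAX : Int := 10 ^ 20

-- ===== PORT A =====
def get_direction_to_fishtype (fw_distances : List (List Int)) (fish_types_by_mall : List (List Int)) : List (List (Option Int)) :=
  let N : Int := fw_distances.length
  let K : Int := fish_types_by_mall.length
  (PySem.List.pyRange 0 N 1).map (fun i =>
    (PySem.List.pyRange 0 K 1).map (fun k =>
      ((PySem.List.pyRange 0 N 1).foldl
        (fun (st : Int × Option Int) j =>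
          if (PySem.List.pyGetD fish_types_by_mall j []).contains k then
            if PySem.List.pyGetD (PySem.List.pyGetD fw_distances i []) j 0 < st.1 then
              (PySem.List.pyGetD (PySem.List.pyGetD fw_distances i []) j 0, some j)
            else st
          else st)
        (pvMAX, (none : Option Int))).2))

-- ===== PORT B =====
-- 'if 0 <= t < K: d = row[j]; if d < best[t][0]: best[t] = (d, j)' of Source B
def pvUpd (row : List Int) (K : Nat) (j : Nat) (b : List (Int × Option Int)) (t : Int) : List (Int × Option Int) :=
  if 0 ≤ t ∧ t < (K : Int) then
    let d := PySem.List.pyGetD row (j : Int) 0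
    if d < (b.getD t.toNat (0, none)).1 then b.set t.toNat (d, some (j : Int)) else b
  else b

-- '_row_pass' of Source B: single pass over zip(range(N), fish_types_by_mall)
def pvRowPass (row : List Int) (fish_types_by_mall : List (List Int)) (N : Nat) : List (Int × Option Int) :=
  ((List.range N).zip fish_types_by_mall).foldl
    (fun b jt => jt.2.foldl (pvUpd row fish_types_by_mall.length jt.1) b)
    (List.replicate fish_types_by_mall.length (pvMAX, (none : Option Int)))

def get_direction_to_fishtype_alt (fw_distances : List (List Int)) (fish_types_by_mall : List (List Int)) : List (List (Option Int)) :=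
  fw_distances.map (fun row =>
    (pvRowPass row fish_types_by_mall fw_distances.length).map (fun b => b.2))

-- ===== PRECONDITION & SPEC =====
-- Pre_ excludes exactly the inputs where Python A raises IndexError: when both lists are
-- nonempty, it needs fish_types_by_mall[j] for every j < N (so N ≤ K), and row[j] for every
-- mall j that carries some fish type in range(K) (so such j must be inside every row).
def Pre_get_direction_to_fishtype (fw_distances : List (List Int)) (fish_types_by_mall : List (List Int)) : Prop :=
  fw_distances ≠ [] → fish_types_by_mall ≠ [] →
    (fw_distances.length ≤ fish_types_by_mall.length ∧
     ∀ row ∈ fw_distances, ∀ j ∈ List.range fw_distances.length,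
       (∃ x ∈ fish_types_by_mall.getD j [], 0 ≤ x ∧ x < (fish_types_by_mall.length : Int)) →
       j < row.length)
instance (fw_distances : List (List Int)) (fish_types_by_mall : List (List Int)) : Decidable (Pre_get_direction_to_fishtype fw_distances fish_types_by_mall) := by unfold Pre_get_direction_to_fishtype; infer_instance

def pvWitness_get_direction_to_fishtype : List (List Int) × List (List Int) := ([[0, 5], [5, 0]], [[0], [1]])

def Spec_get_direction_to_fishtype (fw_distances : List (List Int)) (fish_types_by_mall : List (List Int)) (out : List (List (Option Int))) : Prop := out = get_direction_to_fishtype_alt fw_distances fish_types_by_mall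
instance (fw_distances : List (List Int)) (fish_types_by_mall : List (List Int)) (out : List (List (Option Int))) : Decidable (Spec_get_direction_to_fishtype fw_distances fish_types_by_mall out) := by unfold Spec_get_direction_to_fishtype; infer_instance

-- ===== CLAIM (what is proved, stated in full; the proofs are below) =====
def Claim_equal_get_direction_to_fishtype : Prop := ∀ (fw_distances : List (List Int)) (fish_types_by_mall : List (List Int)), Dom_get_direction_to_fishtype fw_distances fish_types_by_mall → Pre_get_direction_to_fishtype fw_distances fish_types_by_mall → Spec_get_direction_to_fishtype fw_distances fish_types_by_mall (get_direction_to_fishtype fw_distances fish_types_by_mall)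

-- ===== LEMMAS AND PROOFS =====

-- A's per-(row, type) minimum scan, as a step function over a (mall index, its types) pair
def pvStepA (row : List Int) (k : Int) (st : Int × Option Int) (jt : Nat × List Int) : Int × Option Int :=
  if jt.2.contains k then
    if PySem.List.pyGetD row (jt.1 : Int) 0 < st.1 then (PySem.List.pyGetD row (jt.1 : Int) 0, some (jt.1 : Int))
    else st
  else st

theorem pv_getD_set_self (l : List (Int × Option Int)) (i : Nat) (h : i < l.length) (a : Int × Option Int) :
    (l.set i a).getD i (0, none) = a := by
  simp [List.getD_eq_getElem?_getD, h]

theorem pv_getD_set_ne (l : List (Int × Option Int)) (i j : Nat) (h : i ≠ j) (a : Int × Option Int) :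
    (l.set i a).getD j (0, none) = l.getD j (0, none) := by
  simp [List.getD_eq_getElem?_getD, List.getElem?_set_ne h]

theorem pvUpd_length (row : List Int) (K : Nat) (j : Nat) (b : List (Int × Option Int)) (t : Int) :
    (pvUpd row K j b t).length = b.length := by
  unfold pvUpd; dsimp only; split_ifs <;> simp

-- effect of the inner loop (over one mall's type list) on one table slot kn:
-- exactly one step of A's minimum scan for type kn, guarded by membership
theorem pv_inner (row : List Int) (K : Nat) (j : Nat) (types : List Int)
    (b : List (Int × Option Int)) (hb : b.length = K) (kn : Nat) (hk : kn < K) :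
    (types.foldl (pvUpd row K j) b).getD kn (0, none) =
      pvStepA row (kn : Int) (b.getD kn (0, none)) (j, types) := by
  induction types generalizing b with
  | nil => simp [pvStepA]
  | cons t ts ih =>
    have hb' : (pvUpd row K j b t).length = K := by rw [pvUpd_length]; exact hb
    rw [List.foldl_cons, ih _ hb']
    by_cases ht : t = (kn : Int)
    · subst ht
      have hcond : 0 ≤ (kn : Int) ∧ (kn : Int) < (K : Int) := ⟨Int.natCast_nonneg kn, by exact_mod_cast hk⟩
      have hkb : kn < b.length := hb ▸ hk
      simp only [pvUpd, if_pos hcond, Int.toNat_natCast]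
      by_cases hd : PySem.List.pyGetD row (j : Int) 0 < (b.getD kn (0, none)).1
      · rw [if_pos hd, pv_getD_set_self b kn hkb]
        simp only [pvStepA, List.contains_cons, BEq.rfl, Bool.true_or, if_true]
        split_ifs with h2 h3
        · exact absurd h3 (lt_irrefl _)
        · rfl
        · rfl
      · rw [if_neg hd]
        simp only [pvStepA, List.contains_cons, BEq.rfl, Bool.true_or, if_true, if_neg hd]
        split_ifs with h2 <;> rfl
    · have hset : (pvUpd row K j b t).getD kn (0, none) = b.getD kn (0, none) := by
        unfold pvUpd; dsimp only; split_ifs with h1 h2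
        · exact pv_getD_set_ne b t.toNat kn (by omega) _
        · rfl
        · rfl
      rw [hset]
      have hcont : (t :: ts).contains (kn : Int) = ts.contains (kn : Int) := by
        simp [Ne.symm ht]
      simp only [pvStepA, hcont]

theorem pv_inner_length (row : List Int) (K : Nat) (j : Nat) (types : List Int) (b : List (Int × Option Int)) :
    (types.foldl (pvUpd row K j) b).length = b.length := by
  induction types generalizing b with
  | nil => rfl
  | cons t ts ih => rw [List.foldl_cons, ih, pvUpd_length]

theorem pv_outer_length (row : List Int) (K : Nat) (L : List (Nat × List Int)) (b : List (Int × Option Int)) :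
    (L.foldl (fun b jt => jt.2.foldl (pvUpd row K jt.1) b) b).length = b.length := by
  induction L generalizing b with
  | nil => rfl
  | cons jt L ih => rw [List.foldl_cons, ih, pv_inner_length]

-- B's whole pass, observed at one table slot kn, is A's fold for type kn
theorem pv_outer (row : List Int) (K : Nat) (L : List (Nat × List Int))
    (b : List (Int × Option Int)) (hb : b.length = K) (kn : Nat) (hk : kn < K) :
    (L.foldl (fun b jt => jt.2.foldl (pvUpd row K jt.1) b) b).getD kn (0, none) =
      L.foldl (pvStepA row (kn : Int)) (b.getD kn (0, none)) := by
  induction L generalizing b with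
  | nil => rfl
  | cons jt L ih =>
    rw [List.foldl_cons, List.foldl_cons,
        ih _ (by rw [pv_inner_length]; exact hb),
        pv_inner row K jt.1 jt.2 b hb kn hk]

theorem pv_zip_eq_map (ft : List (List Int)) (N : Nat) (hN : N ≤ ft.length) :
    (List.range N).zip ft = (List.range N).map (fun j => (j, ft.getD j [])) := by
  apply List.ext_getElem
  · simp [Nat.min_eq_left hN]
  · intro i h1 h2
    simp at h1 h2 ⊢
    rw [List.getElem?_eq_getElem (lt_of_lt_of_le h2 hN)]
    rfl

-- B's zip traversal = A's index loop over range(N), when all indices are in bounds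
theorem pv_zip (row : List Int) (ft : List (List Int)) (N : Nat) (hN : N ≤ ft.length)
    (k : Int) (st : Int × Option Int) :
    ((List.range N).zip ft).foldl (pvStepA row k) st
      = (PySem.List.pyRange 0 (N : Int) 1).foldl
          (fun (st : Int × Option Int) j =>
            if (PySem.List.pyGetD ft j []).contains k then
              if PySem.List.pyGetD row j 0 < st.1 then (PySem.List.pyGetD row j 0, some j) else st
            else st) st := by
  rw [pv_zip_eq_map ft N hN, PySem.List.pyRange_one, List.foldl_map, List.foldl_map]
  have : ((N : Int) - 0).toNat = N := by omega
  rw [this]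
  apply PySem.List.foldl_congr_mem
  intro st j _
  simp [pvStepA, PySem.List.pyGetD_natCast]

theorem pv_main (fw ft : List (List Int)) (hpre : Pre_get_direction_to_fishtype fw ft) :
    get_direction_to_fishtype fw ft = get_direction_to_fishtype_alt fw ft := by
  unfold get_direction_to_fishtype get_direction_to_fishtype_alt
  dsimp only
  apply List.ext_getElem
  · simp [PySem.List.length_pyRange_one]
  · intro i h1 h2
    rw [List.getElem_map, List.getElem_map, PySem.List.getElem_pyRange_one]
    have hiN : i < fw.length := by simpa [PySem.List.length_pyRange_one] using h1
    have hfwget : PySem.List.pyGetD fw (i : Int) [] = fw[i] := by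
      rw [PySem.List.pyGetD_natCast, List.getD_eq_getElem fw [] hiN]
    apply List.ext_getElem
    · simp [PySem.List.length_pyRange_one, pvRowPass, pv_outer_length]
    · intro kn hk1 hk2
      have hkK : kn < ft.length := by simpa [PySem.List.length_pyRange_one] using hk1
      have hN : fw.length ≤ ft.length := by
        have hfw : fw ≠ [] := by intro h; rw [h] at hiN; simp at hiN
        have hft : ft ≠ [] := by intro h; rw [h] at hkK; simp at hkK
        exact (hpre hfw hft).1
      rw [List.getElem_map, List.getElem_map, PySem.List.getElem_pyRange_one]
      have hknP : kn < (pvRowPass fw[i] ft fw.length).length := by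
        simpa [pvRowPass, pv_outer_length] using hkK
      rw [← List.getD_eq_getElem (pvRowPass fw[i] ft fw.length) (0, none) hknP]
      unfold pvRowPass
      rw [pv_outer fw[i] ft.length _ _ (by simp) kn hkK, List.getD_replicate,
          pv_zip fw[i] ft fw.length hN (kn : Int) (pvMAX, none)]
      · simp only [zero_add, hfwget]
      · exact hkK

-- ===== VERDICT (by name: the statement is the Claim_ definition above) =====
theorem get_direction_to_fishtype_spec : Claim_equal_get_direction_to_fishtype := by
  intro fw ft _ hpre
  unfold Spec_get_direction_to_fishtype
  exact pv_main fw ft hpre
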